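-- pv_equiv track=rewrite | github.com/rod-ycli/negation-cue-detection | code/feature_extraction.py | extract_previous_and_next
-- ===== SOURCE A (Python) =====
-- from typing import List, Tuple
--
-- def extract_previous_and_next(elements: List[str]) -> Tuple[List[str], List[str]]:
--     """
--     Extract previous and preceding token or lemma from a list of tokens or lemmas
--     :param elements: list with tokens or lemmas
--     :return: list with previous tokens/lemmas, list with next tokens/lemmas
--     """
--     position_index = 0
--
--     prev_tokens = []
--     next_tokens = []
--
--     bos_previous, eos_next = False, False  # flags to tell us where sentences end
--
--     for i in range(len(elements)):
--
--         prev_index = (position_index - 1)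
--         next_index = (position_index + 1)
--
--         # previous token
--         if prev_index < 0:
--             previous_token = "bos"
--
--         else:
--             previous_token = elements[prev_index]
--             if previous_token == '':  # if there's an empty line before this token
--                 previous_token = "bos"
--                 bos_previous = True
--
--             if bos_previous:
--                 prev_tokens[position_index - 1] = ''
--                 bos_previous = False
--
--         prev_tokens.append(previous_token)
--
--         # next token
--         if eos_next:
--             next_token = ''
--             eos_next = False
--
--         elif next_index < len(elements):
--             next_token = elements[next_index]
--             if next_token == '':  # if there's an empty line after this token
--                 next_token = 'eos'
--                 eos_next = True
--         else:
--             next_token = "eos"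
--
--         next_tokens.append(next_token)
--
--         # moving to next token in list
--         position_index += 1
--
--     return prev_tokens, next_tokens
-- ===== SOURCE B (Python) =====
-- from typing import List, Tuple
--
-- def extract_previous_and_next(elements: List[str]) -> Tuple[List[str], List[str]]:
--     n = len(elements)
--     prev_tokens = ['' if elements[j] == '' and j < n - 1
--                    else 'bos' if j == 0 or elements[j - 1] == ''
--                    else elements[j - 1]
--                    for j in range(n)]
--     next_tokens = ['' if i >= 1 and elements[i] == ''
--                    else 'eos' if i == n - 1 or elements[i + 1] == ''
--                    else elements[i + 1]
--                    for i in range(n)]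
--     return prev_tokens, next_tokens
-- ===== Notes on version B (the rewrite author's own statement) =====
-- stated objective: simpler
-- what changed: Replaced A's stateful single loop with flags and back-patching (prev_tokens[i-1] rewritten a step later) by two independent list comprehensions that compute each entry directly from its neighbours with no mutable state.
-- intended difference: On lists with two adjacent empty strings at positions >= 1 (a run of blank lines), A's leftover eos_next flag alternates and reports the following raw token (or 'eos') instead of '' for every second blank position, while B uniformly returns '' for any blank position after index 0, which is the intended sentence-boundary marker. — e.g. on extract_previous_and_next(["a", "", "", "b"]): A returns (["bos", "", "", "bos"], ["eos", "", "b", "eos"]), B returns (["bos", "", "", "bos"], ["eos", "", "", "eos"])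
import Mathlib
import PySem

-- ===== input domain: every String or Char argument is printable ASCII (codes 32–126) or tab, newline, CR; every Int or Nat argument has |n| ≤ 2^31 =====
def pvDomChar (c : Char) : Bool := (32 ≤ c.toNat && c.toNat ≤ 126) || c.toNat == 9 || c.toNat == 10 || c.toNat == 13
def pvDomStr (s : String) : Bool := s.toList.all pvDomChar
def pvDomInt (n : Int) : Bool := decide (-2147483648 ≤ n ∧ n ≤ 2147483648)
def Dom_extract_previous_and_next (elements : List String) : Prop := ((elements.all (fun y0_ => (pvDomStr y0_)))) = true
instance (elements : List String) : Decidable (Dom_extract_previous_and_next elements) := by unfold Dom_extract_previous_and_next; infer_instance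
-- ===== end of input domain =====

-- B replaces A's stateful loop (flags + back-patching of prev_tokens[i-1]) by two direct
-- neighbour-lookup comprehensions; same cost, simpler.  On runs of blank lines A's leftover
-- eos flag gives an alternating result; B is uniformly '' there (see D_ below).

-- ===== PORT A =====
-- loop body of A; state = (prev_tokens, next_tokens, bos_previous, eos_next); i is the loop
-- counter (= position_index).  elements[prev_index]/elements[next_index] are only read with
-- the index in range, ported as getD; 'prev_index < 0' holds exactly when i = 0.
def stepA (elements : List String) (st : List String × List String × Bool × Bool) (i : Nat) :
    List String × List String × Bool × Bool :=
  let prev_tokens := st.1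
  let next_tokens := st.2.1
  let bos_previous := st.2.2.1
  let eos_next := st.2.2.2
  -- previous token
  let (previous_token, bos_previous, prev_tokens) :=
    if i = 0 then ("bos", bos_previous, prev_tokens)
    else
      let previous_token := elements.getD (i - 1) ""
      let (previous_token, bos_previous) :=
        if previous_token = "" then ("bos", true) else (previous_token, bos_previous)
      let prev_tokens := if bos_previous then prev_tokens.set (i - 1) "" else prev_tokens
      let bos_previous := if bos_previous then false else bos_previous
      (previous_token, bos_previous, prev_tokens)
  let prev_tokens := prev_tokens ++ [previous_token]
  -- next token
  let (next_token, eos_next) :=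
    if eos_next then ("", false)
    else if i + 1 < elements.length then
      let next_token := elements.getD (i + 1) ""
      if next_token = "" then ("eos", true) else (next_token, eos_next)
    else ("eos", eos_next)
  let next_tokens := next_tokens ++ [next_token]
  (prev_tokens, next_tokens, bos_previous, eos_next)

def extract_previous_and_next (elements : List String) : List String × List String :=
  let r := (List.range elements.length).foldl (stepA elements) ([], [], false, false)
  (r.1, r.2.1)

-- ===== PORT B =====
-- transliteration of Source B: two list comprehensions; elements[j] (always in range) ported as getD
def extract_previous_and_next_alt (elements : List String) : List String × List String :=
  let n := elements.length
  ((List.range n).map (fun j =>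
      if elements.getD j "" = "" ∧ j < n - 1 then ""
      else if j = 0 ∨ elements.getD (j - 1) "" = "" then "bos"
      else elements.getD (j - 1) ""),
   (List.range n).map (fun i =>
      if 1 ≤ i ∧ elements.getD i "" = "" then ""
      else if i = n - 1 ∨ elements.getD (i + 1) "" = "" then "eos"
      else elements.getD (i + 1) ""))

-- ===== PRECONDITION & SPEC =====
-- On lists with two adjacent empty strings at positions ≥ 1 A's leftover eos_next flag
-- alternates along the run and reports the following raw token (or 'eos') instead of '' for
-- every second blank position; B returns '' for every blank position after index 0, the
-- intended sentence-boundary marker.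
def D_extract_previous_and_next (elements : List String) : Prop :=
  ((List.range elements.length).any (fun j =>
    decide (1 ≤ j) && decide (j + 1 < elements.length) &&
    (elements.getD j "x" == "") && (elements.getD (j + 1) "x" == ""))) = true
instance (elements : List String) : Decidable (D_extract_previous_and_next elements) := by
  unfold D_extract_previous_and_next; infer_instance

def Spec_extract_previous_and_next (elements : List String) (out : List String × List String) : Prop :=
  ¬ D_extract_previous_and_next elements → out = extract_previous_and_next_alt elements
instance (elements : List String) (out : List String × List String) :
    Decidable (Spec_extract_previous_and_next elements out) := by
  unfold Spec_extract_previous_and_next; infer_instance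

def pvDiffWitness_extract_previous_and_next : List String := ["a", "", "", "b"]
def pvDiffWitnessOut_extract_previous_and_next :
    (List String × List String) × (List String × List String) :=
  ((["bos", "", "", "bos"], ["eos", "", "b", "eos"]),
   (["bos", "", "", "bos"], ["eos", "", "", "eos"]))

-- ===== CLAIM (what is proved, stated in full; the proofs are below) =====
def Claim_unchanged_extract_previous_and_next : Prop :=
  ∀ (elements : List String), Dom_extract_previous_and_next elements →
    Spec_extract_previous_and_next elements (extract_previous_and_next elements)
def Claim_changed_extract_previous_and_next : Prop :=
  Dom_extract_previous_and_next (pvDiffWitness_extract_previous_and_next) ∧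
  D_extract_previous_and_next (pvDiffWitness_extract_previous_and_next) ∧
  extract_previous_and_next (pvDiffWitness_extract_previous_and_next) = pvDiffWitnessOut_extract_previous_and_next.1 ∧
  extract_previous_and_next_alt (pvDiffWitness_extract_previous_and_next) = pvDiffWitnessOut_extract_previous_and_next.2 ∧
  pvDiffWitnessOut_extract_previous_and_next.1 ≠ pvDiffWitnessOut_extract_previous_and_next.2
def Claim_exact_extract_previous_and_next : Prop :=
  ∀ (elements : List String), Dom_extract_previous_and_next elements →
    D_extract_previous_and_next elements →
    extract_previous_and_next elements ≠ extract_previous_and_next_alt elements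

-- ===== LEMMAS AND PROOFS =====

-- eos_next entering iteration k
def fE (e : List String) : Nat → Bool
  | 0 => false
  | k + 1 => !(fE e k) && decide (k + 1 + 1 ≤ e.length) && (e.getD (k + 1) "" == "")

-- prev_tokens after k iterations
def prevA (e : List String) (k : Nat) : List String :=
  (List.range k).map (fun j =>
    if j + 1 < k ∧ e.getD j "" = "" then ""
    else if j = 0 ∨ e.getD (j - 1) "" = "" then "bos"
    else e.getD (j - 1) "")

-- next_tokens after k iterations
def nextA (e : List String) (k : Nat) : List String :=
  (List.range k).map (fun i =>
    if fE e i then ""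
    else if i + 1 < e.length then
      (if e.getD (i + 1) "" = "" then "eos" else e.getD (i + 1) "")
    else "eos")

lemma set_map_range (f : Nat → String) (k m : Nat) (v : String) :
    ((List.range k).map f).set m v = (List.range k).map (fun j => if j = m then v else f j) := by
  apply List.ext_getElem
  · simp
  · intro j h1 h2
    simp only [List.getElem_set, List.getElem_map, List.getElem_range]
    by_cases h : m = j
    · subst h; simp
    · rw [if_neg h, if_neg (fun hh => h hh.symm)]

lemma prevA_succ (e : List String) (k : Nat) (hk1 : 1 ≤ k) :
    prevA e (k + 1) =
      (if e.getD (k - 1) "" = "" then (prevA e k).set (k - 1) "" else prevA e k) ++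
      [if e.getD (k - 1) "" = "" then "bos" else e.getD (k - 1) ""] := by
  unfold prevA
  rw [List.range_succ, List.map_append]
  congr 1
  · by_cases hc : e.getD (k - 1) "" = ""
    · rw [if_pos hc, set_map_range]
      apply List.map_congr_left
      intro j hj
      rw [List.mem_range] at hj
      by_cases hd : j = k - 1
      · rw [if_pos hd, if_pos ⟨by omega, by rw [hd]; exact hc⟩]
      · rw [if_neg hd]
        have hiff : (j + 1 < k + 1 ∧ e.getD j "" = "") ↔ (j + 1 < k ∧ e.getD j "" = "") := by
          constructor <;> rintro ⟨a, b⟩ <;> exact ⟨by omega, b⟩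
        simp only [hiff]
    · rw [if_neg hc]
      apply List.map_congr_left
      intro j hj
      rw [List.mem_range] at hj
      by_cases hd : j = k - 1
      · subst hd
        rw [if_neg (fun h => hc h.2), if_neg (by omega : ¬ (k - 1 + 1 < k ∧ e.getD (k - 1) "" = ""))]
      · have hiff : (j + 1 < k + 1 ∧ e.getD j "" = "") ↔ (j + 1 < k ∧ e.getD j "" = "") := by
          constructor <;> rintro ⟨a, b⟩ <;> exact ⟨by omega, b⟩
        simp only [hiff]
  · simp only [List.map_cons, List.map_nil]
    congr 1
    rw [if_neg (by omega : ¬ (k + 1 < k + 1 ∧ e.getD k "" = ""))]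
    by_cases hc : e.getD (k - 1) "" = ""
    · rw [if_pos (Or.inr hc), if_pos hc]
    · rw [if_neg (fun h => h.elim (fun h0 => absurd h0 (by omega)) hc), if_neg hc]

lemma loopA_inv (e : List String) (k : Nat) (hk : k ≤ e.length) :
    (List.range k).foldl (stepA e) ([], [], false, false) =
      (prevA e k, nextA e k, false, fE e k) := by
  induction k with
  | zero => simp [prevA, nextA, fE]
  | succ k ih =>
    rw [List.range_succ, List.foldl_append, ih (by omega), List.foldl_cons, List.foldl_nil]
    show stepA e (prevA e k, nextA e k, false, fE e k) k = _
    have hnext : nextA e (k + 1) = nextA e k ++ [if fE e k then ""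
        else if k + 1 < e.length then
          (if e.getD (k + 1) "" = "" then "eos" else e.getD (k + 1) "")
        else "eos"] := by
      unfold nextA; rw [List.range_succ, List.map_append]; rfl
    have hfE : fE e (k + 1) =
        (!(fE e k) && decide (k + 1 < e.length) && (e.getD (k + 1) "" == "")) := rfl
    by_cases hk0 : k = 0
    · subst hk0
      have hp0 : prevA e 0 = [] := by simp [prevA]
      have hn0 : nextA e 0 = [] := by simp [nextA]
      have hp1 : prevA e 1 = ["bos"] := by simp [prevA, List.range_succ]
      have hf0 : fE e 0 = false := rfl
      rw [hnext, hp0, hn0, hp1, hfE, hf0]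
      unfold stepA
      simp only
      set q := e.getD (0 + 1) "" with hq
      by_cases h2 : 0 + 1 < e.length <;> by_cases h3 : q = "" <;>
        simp [h2, h3]
    · rw [hnext, prevA_succ e k (by omega), hfE]
      unfold stepA
      simp only
      rw [if_neg hk0]
      simp only
      set p := e.getD (k - 1) "" with hp
      set q := e.getD (k + 1) "" with hq
      set f := fE e k with hfk
      by_cases hc : p = "" <;> by_cases hf : f = true <;>
        by_cases h2 : k + 1 < e.length <;> by_cases h3 : q = "" <;>
        simp [hc, hf, h2, h3]

lemma A_eq (e : List String) :
    extract_previous_and_next e = (prevA e e.length, nextA e e.length) := by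
  unfold extract_previous_and_next
  rw [loopA_inv e e.length le_rfl]

lemma getD_switch {e : List String} {j : Nat} (hj : j < e.length) :
    e.getD j "x" = e.getD j "" := by
  rw [List.getD_eq_getElem _ _ hj, List.getD_eq_getElem _ _ hj]

lemma notD_spec {e : List String} (hD : ¬ D_extract_previous_and_next e) :
    ∀ j, 1 ≤ j → j + 1 < e.length → e.getD j "" = "" → e.getD (j + 1) "" ≠ "" := by
  intro j h1 h2 h3 h4
  apply hD
  unfold D_extract_previous_and_next
  rw [List.any_eq_true]
  refine ⟨j, List.mem_range.mpr (by omega), ?_⟩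
  simp only [Bool.and_eq_true, decide_eq_true_eq, beq_iff_eq]
  exact ⟨⟨⟨h1, h2⟩, (getD_switch (by omega)).trans h3⟩, (getD_switch (by omega)).trans h4⟩

lemma fE_char {e : List String} (hD : ¬ D_extract_previous_and_next e) :
    ∀ i, i < e.length → fE e i = (decide (1 ≤ i) && (e.getD i "" == "")) := by
  intro i
  induction i with
  | zero => intro _; simp [fE]
  | succ k ih =>
    intro hk
    have ihk := ih (by omega)
    have hdl : decide (k + 1 + 1 ≤ e.length) = true := decide_eq_true hk
    have hd1 : decide (1 ≤ k + 1) = true := decide_eq_true (by omega)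
    have hfE : fE e (k + 1) =
        (!(fE e k) && decide (k + 1 + 1 ≤ e.length) && (e.getD (k + 1) "" == "")) := rfl
    by_cases hke : e.getD (k + 1) "" = ""
    · have hb : (e.getD (k + 1) "" == "") = true := beq_iff_eq.mpr hke
      rw [hfE, ihk, hb, hdl, hd1, Bool.and_true, Bool.and_true, Bool.true_and]
      by_cases h1k : 1 ≤ k
      · have hkne : e.getD k "" ≠ "" := fun hkk => notD_spec hD k h1k hk hkk hke
        rw [beq_eq_false_iff_ne.mpr hkne]
        simp
      · have : decide (1 ≤ k) = false := decide_eq_false h1k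
        rw [this]
        simp
    · have hb : (e.getD (k + 1) "" == "") = false := beq_eq_false_iff_ne.mpr hke
      rw [hfE, hb, hd1]
      simp

lemma B_eq (e : List String) (hD : ¬ D_extract_previous_and_next e) :
    extract_previous_and_next_alt e = (prevA e e.length, nextA e e.length) := by
  unfold extract_previous_and_next_alt
  simp only
  rw [Prod.mk.injEq]
  refine ⟨?_, ?_⟩
  · -- prev component
    unfold prevA
    apply List.map_congr_left
    intro j hj
    rw [List.mem_range] at hj
    have hiff : (e.getD j "" = "" ∧ j < e.length - 1) ↔ (j + 1 < e.length ∧ e.getD j "" = "") := by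
      constructor
      · rintro ⟨a, b⟩; exact ⟨by omega, a⟩
      · rintro ⟨a, b⟩; exact ⟨b, by omega⟩
    simp only [hiff]
  · -- next component
    unfold nextA
    apply List.map_congr_left
    intro i hi
    rw [List.mem_range] at hi
    rw [fE_char hD i hi]
    by_cases h1 : 1 ≤ i ∧ e.getD i "" = ""
    · have hbt : (decide (1 ≤ i) && (e.getD i "" == "")) = true := by
        rw [decide_eq_true h1.1, beq_iff_eq.mpr h1.2]; rfl
      rw [if_pos h1, hbt]
      simp
    · have hx : (decide (1 ≤ i) && (e.getD i "" == "")) = false := by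
        simp only [Bool.and_eq_false_iff]
        by_cases hy : 1 ≤ i
        · right; exact beq_eq_false_iff_ne.mpr (fun h => h1 ⟨hy, h⟩)
        · left; exact decide_eq_false hy
      rw [if_neg h1, hx]
      simp only [Bool.false_eq_true, if_false]
      by_cases h2 : i + 1 < e.length
      · by_cases h3 : e.getD (i + 1) "" = ""
        · rw [if_pos (Or.inr h3), if_pos h2, if_pos h3]
        · have hno : ¬ (i = e.length - 1 ∨ e.getD (i + 1) "" = "") := by
            rintro (h | h)
            · omega
            · exact h3 h
          rw [if_neg hno, if_pos h2, if_neg h3]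
      · have he : i = e.length - 1 := by omega
        rw [if_pos (Or.inl he), if_neg h2]

-- ===== VERDICT (by name: the statement is the Claim_ definition above) =====
theorem extract_previous_and_next_spec : Claim_unchanged_extract_previous_and_next := by
  intro e _ hD
  rw [A_eq e, B_eq e hD]

theorem extract_previous_and_next_changed : Claim_changed_extract_previous_and_next := by
  unfold Claim_changed_extract_previous_and_next; decide

theorem extract_previous_and_next_tight : Claim_exact_extract_previous_and_next := by
  intro e _ hD heq
  unfold D_extract_previous_and_next at hD
  rw [List.any_eq_true] at hD
  obtain ⟨j, hjm, hj⟩ := hD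
  rw [List.mem_range] at hjm
  simp only [Bool.and_eq_true, decide_eq_true_eq, beq_iff_eq] at hj
  obtain ⟨⟨⟨hj1, hj2⟩, hj3⟩, hj4⟩ := hj
  rw [getD_switch (by omega)] at hj3
  rw [getD_switch (by omega)] at hj4
  -- the blank position at which A's eos flag is off
  set i : Nat := if fE e j then j + 1 else j with hi
  have hie : e.getD i "" = "" := by
    by_cases hf : fE e j = true
    · rw [hi, if_pos hf]; exact hj4
    · rw [hi, if_neg hf]; exact hj3
  have hi1 : 1 ≤ i := by
    by_cases hf : fE e j = true
    · rw [hi, if_pos hf]; omega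
    · rw [hi, if_neg hf]; omega
  have hin : i < e.length := by
    by_cases hf : fE e j = true
    · rw [hi, if_pos hf]; omega
    · rw [hi, if_neg hf]; omega
  have hfi : fE e i = false := by
    by_cases hf : fE e j = true
    · rw [hi, if_pos hf]
      show (!(fE e j) && decide (j + 1 + 1 ≤ e.length) && (e.getD (j + 1) "" == "")) = false
      rw [hf]
      simp
    · rw [hi, if_neg hf]
      exact Bool.not_eq_true _ ▸ hf
  have h2 := congrArg Prod.snd heq
  rw [A_eq e] at h2
  unfold extract_previous_and_next_alt at h2
  simp only at h2
  unfold nextA at h2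
  have h3x := congrArg (fun l : List String => l[i]?) h2
  simp only [List.getElem?_map] at h3x
  rw [List.getElem?_range hin] at h3x
  simp only [Option.map_some] at h3x
  have hne := Option.some.inj h3x
  rw [hfi] at hne
  simp only [Bool.false_eq_true, if_false] at hne
  have hrhs : (if 1 ≤ i ∧ e.getD i "" = "" then ""
      else if i = e.length - 1 ∨ e.getD (i + 1) "" = "" then "eos" else e.getD (i + 1) "") = "" :=
    if_pos ⟨hi1, hie⟩
  rw [hrhs] at hne
  by_cases h5 : i + 1 < e.length
  · rw [if_pos h5] at hne
    by_cases h6 : e.getD (i + 1) "" = ""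
    · rw [if_pos h6] at hne; exact absurd hne (by decide)
    · rw [if_neg h6] at hne; exact h6 hne
  · rw [if_neg h5] at hne; exact absurd hne (by decide)
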